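-- pv_equiv track=rewrite | github.com/julian-hoelz/mastermind | fancy_io.py | _prepare_option_replacement
-- ===== SOURCE A (Python) =====
-- def _prepare_option_replacement(option_format: str) -> tuple[str, int]:
--     result = ''
--     in_tag = False
--     start = 0
--     tabs = 0
--     # inp_start = 0
--     inp_index = 0
--     for (i, char) in enumerate(option_format + '<'):
--         if char == '<':
--             # result += _apply_case_option(option_format[start:i], inp[inp_start:inp_index])
--             result += option_format[start:i]
--             in_tag = True
--             start = i
--         elif char == '>':
--             result += option_format[start:i + 1]
--             in_tag = False
--             start = i + 1
--             # inp_start = inp_index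
--         elif char == '\t':
--             if not in_tag:
--                 tabs += 1
--             inp_index += 1
--         else:
--             if not in_tag:
--                 inp_index += 1
--     return (result, tabs)
-- ===== SOURCE B (Python) =====
-- def _prepare_option_replacement(option_format: str) -> tuple[str, int]:
--     tabs = 0
--     in_tag = False
--     for char in option_format:
--         if char == '<':
--             in_tag = True
--         elif char == '>':
--             in_tag = False
--         elif char == '\t' and not in_tag:
--             tabs += 1
--     return (option_format, tabs)
-- ===== Notes on version B (the rewrite author's own statement) =====
-- stated objective: simpler
-- what changed: B drops A's slice-based string rebuilding entirely (the appended slices always partition the input, so the first component is the input unchanged) and computes the tab count in one plain pass toggling an in_tag flag, without start/result/inp_index bookkeeping or the trailing sentinel character.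
import Mathlib
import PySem

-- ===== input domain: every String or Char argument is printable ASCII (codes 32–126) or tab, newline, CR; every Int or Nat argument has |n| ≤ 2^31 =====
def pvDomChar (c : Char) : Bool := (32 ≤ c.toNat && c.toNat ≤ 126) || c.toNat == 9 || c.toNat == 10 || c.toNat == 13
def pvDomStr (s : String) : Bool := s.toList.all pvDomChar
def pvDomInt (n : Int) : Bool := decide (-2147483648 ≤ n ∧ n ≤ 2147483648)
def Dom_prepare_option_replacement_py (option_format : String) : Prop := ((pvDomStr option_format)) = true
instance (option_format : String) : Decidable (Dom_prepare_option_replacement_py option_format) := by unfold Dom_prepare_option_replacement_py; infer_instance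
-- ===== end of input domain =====

-- B returns the input string unchanged (A's slice rebuilding is the identity) and counts
-- out-of-tag tabs in one simple pass; objective: simpler.

-- ===== PORT A =====
-- state: (result, in_tag, start, tabs, inp_index)
def pvAStep (inp : List Char) (st : List Char × Bool × Int × Int × Int) (p : Int × Char) :
    List Char × Bool × Int × Int × Int :=
  match st, p with
  | (result, in_tag, start, tabs, inp_index), (i, char) =>
    if char = '<' then
      (result ++ PySem.List.slice inp (some start) (some i), true, i, tabs, inp_index)
    else if char = '>' then
      (result ++ PySem.List.slice inp (some start) (some (i + 1)), false, i + 1, tabs, inp_index)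
    else if char = '\t' then
      (result, in_tag, start, (if !in_tag then tabs + 1 else tabs), inp_index + 1)
    else
      (result, in_tag, start, tabs, (if !in_tag then inp_index + 1 else inp_index))

def prepare_option_replacement_py (option_format : String) : String × Int :=
  let inp := option_format.toList
  let st := (PySem.List.enumerate (inp ++ ['<']) 0).foldl (pvAStep inp) ([], false, 0, 0, 0)
  (String.ofList st.1, st.2.2.2.1)

-- ===== PORT B =====
-- state: (tabs, in_tag)
def pvBStep (st : Int × Bool) (c : Char) : Int × Bool :=
  if c = '<' then (st.1, true)
  else if c = '>' then (st.1, false)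
  else if c = '\t' && !st.2 then (st.1 + 1, st.2)
  else st

def prepare_option_replacement_py_alt (option_format : String) : String × Int :=
  (option_format, (option_format.toList.foldl pvBStep (0, false)).1)

-- ===== PRECONDITION & SPEC =====
def Spec_prepare_option_replacement_py (option_format : String) (out : String × Int) : Prop := out = prepare_option_replacement_py_alt option_format
instance (option_format : String) (out : String × Int) : Decidable (Spec_prepare_option_replacement_py option_format out) := by unfold Spec_prepare_option_replacement_py; infer_instance

-- ===== CLAIM (what is proved, stated in full; the proofs are below) =====
def Claim_equal_prepare_option_replacement_py : Prop := ∀ (option_format : String), Dom_prepare_option_replacement_py option_format → Spec_prepare_option_replacement_py option_format (prepare_option_replacement_py option_format)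

-- ===== LEMMAS AND PROOFS =====

lemma pvAStep_lt (inp r : List Char) (t : Bool) (s tb ii i : Int) :
    pvAStep inp (r, t, s, tb, ii) (i, '<')
      = (r ++ PySem.List.slice inp (some s) (some i), true, i, tb, ii) := by
  simp [pvAStep]

lemma pvAStep_gt (inp r : List Char) (t : Bool) (s tb ii i : Int) :
    pvAStep inp (r, t, s, tb, ii) (i, '>')
      = (r ++ PySem.List.slice inp (some s) (some (i + 1)), false, i + 1, tb, ii) := by
  simp [pvAStep]

lemma pvAStep_tab (inp r : List Char) (t : Bool) (s tb ii i : Int) :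
    pvAStep inp (r, t, s, tb, ii) (i, '\t')
      = (r, t, s, (if !t then tb + 1 else tb), ii + 1) := by
  simp [pvAStep]

lemma pvAStep_other (inp r : List Char) (t : Bool) (s tb ii i : Int) (c : Char)
    (h1 : c ≠ '<') (h2 : c ≠ '>') (h3 : c ≠ '\t') :
    pvAStep inp (r, t, s, tb, ii) (i, c)
      = (r, t, s, tb, (if !t then ii + 1 else ii)) := by
  simp [pvAStep, h1, h2, h3]

lemma pvBStep_lt (st : Int × Bool) : pvBStep st '<' = (st.1, true) := by simp [pvBStep]
lemma pvBStep_gt (st : Int × Bool) : pvBStep st '>' = (st.1, false) := by simp [pvBStep]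
lemma pvBStep_tab (st : Int × Bool) :
    pvBStep st '\t' = (if !st.2 then st.1 + 1 else st.1, st.2) := by
  cases st with
  | mk a b => cases b <;> simp [pvBStep]
lemma pvBStep_other (st : Int × Bool) (c : Char)
    (h1 : c ≠ '<') (h2 : c ≠ '>') (h3 : c ≠ '\t') : pvBStep st c = st := by
  simp [pvBStep, h1, h2, h3]

-- take start ++ slice inp start b = take b  (for 0 ≤ start, start ≤ b)
lemma pvTakeSlice (inp : List Char) (start : Int) (b : Nat)
    (h0 : 0 ≤ start) (hb : start.toNat ≤ b) :
    inp.take start.toNat ++ PySem.List.slice inp (some start) (some (b : Int))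
      = inp.take b := by
  rw [PySem.List.slice_toNat _ h0 (by positivity)]
  have hbx : b = start.toNat + (((b : Int)).toNat - start.toNat) := by omega
  rw [hbx, List.take_add]
  simp
  omega

-- Loop invariant: folding A's step over the tail of the enumeration (indices from j,
-- accumulator = the first `start` chars of the input) reconstructs the whole input and
-- computes the same tab count as B's fold over the remaining characters.
lemma pvA_loop (inp : List Char) :
    ∀ (l : List Char) (j : Nat) (in_tag : Bool) (start tabs inp_index : Int),
      inp.drop j = l → 0 ≤ start → start ≤ (j : Int) → j ≤ inp.length →
      (((PySem.List.enumerate (l ++ ['<']) (j : Int)).foldl (pvAStep inp)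
          (inp.take start.toNat, in_tag, start, tabs, inp_index)).1 = inp ∧
       ((PySem.List.enumerate (l ++ ['<']) (j : Int)).foldl (pvAStep inp)
          (inp.take start.toNat, in_tag, start, tabs, inp_index)).2.2.2.1
        = (l.foldl pvBStep (tabs, in_tag)).1) := by
  intro l
  induction l with
  | nil =>
    intro j in_tag start tabs inp_index hdrop h0 hsj hjlen
    have hlen : inp.length ≤ j := by
      by_contra h
      have := List.drop_eq_nil_iff.mp hdrop
      omega
    simp only [List.nil_append, PySem.List.enumerate_cons, PySem.List.enumerate_nil,
      List.foldl_cons, List.foldl_nil, pvAStep_lt]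
    refine ⟨?_, trivial⟩
    have h1 : start.toNat ≤ j := by omega
    rw [pvTakeSlice inp start j h0 h1]
    exact List.take_of_length_le hlen
  | cons c l' ih =>
    intro j in_tag start tabs inp_index hdrop h0 hsj hjlen
    have hjlt : j < inp.length := by
      by_contra h
      rw [List.drop_eq_nil_iff.mpr (by omega)] at hdrop
      simp at hdrop
    have hdrop' : inp.drop (j + 1) = l' := by
      rw [← List.drop_drop, hdrop]
      simp
    have hsn : start.toNat ≤ j := by omega
    have hcast : ((j : Int) + 1) = ((j + 1 : Nat) : Int) := by push_cast; ring
    simp only [List.cons_append, PySem.List.enumerate_cons, List.foldl_cons]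
    by_cases hc1 : c = '<'
    · subst hc1
      rw [pvAStep_lt, pvTakeSlice inp start j h0 hsn, pvBStep_lt]
      have h2 : inp.take j = inp.take (((j : Nat) : Int)).toNat := by norm_num
      rw [h2, hcast]
      exact ih (j + 1) true (j : Int) tabs inp_index hdrop' (by positivity)
        (by push_cast; omega) (by omega)
    · by_cases hc2 : c = '>'
      · subst hc2
        rw [pvAStep_gt, hcast, pvTakeSlice inp start (j + 1) h0 (by omega), pvBStep_gt]
        have h2 : inp.take (j + 1) = inp.take (((j + 1 : Nat) : Int)).toNat := by norm_num
        rw [h2]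
        exact ih (j + 1) false ((j + 1 : Nat) : Int) tabs inp_index hdrop'
          (by positivity) (by push_cast; omega) (by omega)
      · by_cases hc3 : c = '\t'
        · subst hc3
          rw [pvAStep_tab, hcast, pvBStep_tab]
          exact ih (j + 1) in_tag start (if !in_tag then tabs + 1 else tabs)
            (inp_index + 1) hdrop' h0 (by push_cast; omega) (by omega)
        · rw [pvAStep_other inp _ _ _ _ _ _ _ hc1 hc2 hc3, hcast,
            pvBStep_other _ _ hc1 hc2 hc3]
          exact ih (j + 1) in_tag start tabs
            (if !in_tag then inp_index + 1 else inp_index) hdrop' h0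
            (by push_cast; omega) (by omega)

-- ===== VERDICT (by name: the statement is the Claim_ definition above) =====
theorem prepare_option_replacement_py_spec : Claim_equal_prepare_option_replacement_py := by
  intro s _
  unfold Spec_prepare_option_replacement_py prepare_option_replacement_py
    prepare_option_replacement_py_alt
  have h := pvA_loop s.toList s.toList 0 false 0 0 0 (by simp) (by norm_num)
    (by norm_num) (by omega)
  simp only [Int.toNat_zero, List.take_zero, Nat.cast_zero] at h
  rw [Prod.ext_iff]
  refine ⟨?_, h.2⟩
  simp only [h.1]
  simp [String.ofList]
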